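-- pv_equiv track=rewrite | github.com/Eigenoperator/OniChase | scripts/ingest/build_v3_shinkansen_bundle.py | combined_route_station_ids
-- ===== SOURCE A (Python) =====
-- from typing import Any
--
-- def dedupe_station_sequence(station_ids: list[str]) -> list[str]:
--     output: list[str] = []
--     for station_id in station_ids:
--         if output and output[-1] == station_id:
--             continue
--         output.append(station_id)
--     return output
--
-- def combined_route_station_ids(route_map: dict[str, dict[str, Any]], route_ids: list[str]) -> list[str]:
--     result: list[str] = []
--     for idx, route_id in enumerate(route_ids):
--         part = route_map[route_id]["station_ids"]
--         if idx and result and part and result[-1] == part[0]: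
--             result.extend(part[1:])
--         else:
--             result.extend(part)
--     return dedupe_station_sequence(result)
-- ===== SOURCE B (Python) =====
-- def combined_route_station_ids(route_map, route_ids):
--     out = []
--     for route_id in route_ids:
--         for station_id in route_map[route_id]["station_ids"]:
--             if not out or out[-1] != station_id:
--                 out.append(station_id)
--     return out
-- ===== Notes on version B (the rewrite author's own statement) =====
-- stated objective: simpler
-- what changed: B replaces A's two-stage build (boundary-skip concatenation followed by a separate consecutive-dedupe pass) with one fused pass that appends a station only when it differs from the current last output element; the boundary-skip branch and the dedupe helper disappear.
import Mathlib
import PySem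

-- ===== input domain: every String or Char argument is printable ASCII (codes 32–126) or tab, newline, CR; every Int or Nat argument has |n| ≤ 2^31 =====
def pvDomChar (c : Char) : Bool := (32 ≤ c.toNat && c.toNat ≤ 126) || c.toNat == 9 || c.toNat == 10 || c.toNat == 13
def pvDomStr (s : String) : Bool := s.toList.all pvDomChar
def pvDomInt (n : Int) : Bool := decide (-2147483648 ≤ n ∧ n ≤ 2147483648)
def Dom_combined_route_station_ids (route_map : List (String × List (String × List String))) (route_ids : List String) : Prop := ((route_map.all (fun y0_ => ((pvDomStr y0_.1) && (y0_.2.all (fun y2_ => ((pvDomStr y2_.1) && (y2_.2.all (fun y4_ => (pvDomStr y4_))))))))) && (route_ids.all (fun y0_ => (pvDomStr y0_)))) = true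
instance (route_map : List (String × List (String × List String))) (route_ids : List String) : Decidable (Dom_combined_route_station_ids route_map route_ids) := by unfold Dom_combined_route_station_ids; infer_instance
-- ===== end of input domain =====

-- B fuses A's two passes (boundary-skip concatenation, then a separate consecutive-dedupe)
-- into one pass that appends a station only when it differs from the last output element (simpler).

-- ===== PORT A =====
-- route_map[route_id]["station_ids"]: dict lookup = first match in the association list;
-- Python raises KeyError when the key is absent — those inputs are excluded by Pre_ below
-- (the port returns [] there, outside the claimed domain).
def pvPart (route_map : List (String × List (String × List String))) (route_id : String) : List String :=
  match route_map.lookup route_id with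
  | none => []
  | some d => (d.lookup "station_ids").getD []

-- literal port of dedupe_station_sequence: fold appending unless output is nonempty with equal last element
def dedupe_station_sequence (station_ids : List String) : List String :=
  station_ids.foldl (fun output station_id =>
    if output ≠ [] ∧ output.getLast? = some station_id then output else output ++ [station_id]) []

-- the enumerate loop of A, as structural recursion carrying idx and result
def pvArawGo (route_map : List (String × List (String × List String))) :
    Nat → List String → List String → List String
  | _, result, [] => result
  | idx, result, route_id :: rest =>
      let part := pvPart route_map route_id
      -- part[1:] = part.drop 1 (exact for the nonnegative slice 1:)
      let result' := if idx ≠ 0 ∧ result ≠ [] ∧ part ≠ [] ∧ result.getLast? = part.head?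
                     then result ++ part.drop 1 else result ++ part
      pvArawGo route_map (idx + 1) result' rest

def combined_route_station_ids (route_map : List (String × List (String × List String))) (route_ids : List String) : List String :=
  dedupe_station_sequence (pvArawGo route_map 0 [] route_ids)

-- ===== PORT B =====
def combined_route_station_ids_alt (route_map : List (String × List (String × List String))) (route_ids : List String) : List String :=
  route_ids.foldl (fun out route_id =>
    (pvPart route_map route_id).foldl (fun out station_id =>
      if out = [] ∨ out.getLast? ≠ some station_id then out ++ [station_id] else out) out) []

-- ===== PRECONDITION & SPEC =====
-- Pre_ excludes exactly the inputs on which Python A raises KeyError: a route_id missing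
-- from route_map, or a route dict without the "station_ids" key.
def Pre_combined_route_station_ids (route_map : List (String × List (String × List String))) (route_ids : List String) : Prop :=
  ∀ route_id ∈ route_ids, ∃ d ∈ route_map.lookup route_id, (d.lookup "station_ids").isSome
instance (route_map : List (String × List (String × List String))) (route_ids : List String) : Decidable (Pre_combined_route_station_ids route_map route_ids) := by unfold Pre_combined_route_station_ids; infer_instance

def pvWitness_combined_route_station_ids : (List (String × List (String × List String))) × List String :=
  ([("r1", [("station_ids", ["s1", "s2"])]), ("r2", [("station_ids", ["s2", "s3"])])], ["r1", "r2"])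

def Spec_combined_route_station_ids (route_map : List (String × List (String × List String))) (route_ids : List String) (out : List String) : Prop := out = combined_route_station_ids_alt route_map route_ids
instance (route_map : List (String × List (String × List String))) (route_ids : List String) (out : List String) : Decidable (Spec_combined_route_station_ids route_map route_ids out) := by unfold Spec_combined_route_station_ids; infer_instance

-- ===== CLAIM (what is proved, stated in full; the proofs are below) =====
def Claim_equal_combined_route_station_ids : Prop := ∀ (route_map : List (String × List (String × List String))) (route_ids : List String), Dom_combined_route_station_ids route_map route_ids → Pre_combined_route_station_ids route_map route_ids → Spec_combined_route_station_ids route_map route_ids (combined_route_station_ids route_map route_ids)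

-- ===== LEMMAS AND PROOFS =====

-- the shared dedupe step
def pvStep (out : List String) (s : String) : List String :=
  if out ≠ [] ∧ out.getLast? = some s then out else out ++ [s]

theorem pvStepB_eq (out : List String) (s : String) :
    (if out = [] ∨ out.getLast? ≠ some s then out ++ [s] else out) = pvStep out s := by
  unfold pvStep; split_ifs with h1 h2 <;> tauto

theorem pvDedupe_eq (l : List String) :
    dedupe_station_sequence l = List.foldl pvStep [] l := rfl

-- folding pvStep leaves the last element equal to the last input element
theorem pvLast_foldl (l : List String) : ∀ out, l ≠ [] →
    (List.foldl pvStep out l).getLast? = l.getLast? := by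
  induction l with
  | nil => intro out h; exact absurd rfl h
  | cons a t ih =>
    intro out _
    by_cases ht : t = []
    · subst ht
      simp only [List.foldl, pvStep]
      split_ifs with h
      · simp [h.2]
      · simp
    · simp only [List.foldl]
      rw [ih (pvStep out a) ht]
      obtain ⟨b, t', rfl⟩ := List.exists_cons_of_ne_nil ht
      simp

theorem pvStep_last (out : List String) (s : String) (h : out.getLast? = some s) :
    pvStep out s = out := by
  unfold pvStep
  rw [if_pos ⟨by rintro rfl; simp at h, h⟩]

-- main invariant: folding pvStep over A's raw accumulator equals B's continued fold
theorem pvMain (route_map : List (String × List (String × List String))) :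
    ∀ (rids : List String) (idx : Nat) (result : List String),
      List.foldl pvStep [] (pvArawGo route_map idx result rids) =
        rids.foldl (fun out route_id =>
          (pvPart route_map route_id).foldl pvStep out) (List.foldl pvStep [] result) := by
  intro rids
  induction rids with
  | nil => intro idx result; rfl
  | cons rid rest ih =>
    intro idx result
    simp only [pvArawGo, List.foldl]
    rw [ih]
    congr 1
    split_ifs with h
    · obtain ⟨-, hres, hpart, hlast⟩ := h
      obtain ⟨p0, pt, hp⟩ : ∃ p0 pt, pvPart route_map rid = p0 :: pt :=
        match pvPart route_map rid, hpart with
        | p :: t, _ => ⟨p, t, rfl⟩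
      rw [hp]; rw [hp] at hlast
      simp only [List.head?_cons] at hlast
      rw [List.foldl_append, List.drop_one, List.tail_cons, List.foldl_cons,
        pvStep_last _ _ (by rw [pvLast_foldl result [] hres]; exact hlast)]
    · rw [List.foldl_append]

-- ===== VERDICT (by name: the statement is the Claim_ definition above) =====
theorem combined_route_station_ids_spec : Claim_equal_combined_route_station_ids := by
  intro route_map route_ids _ _
  unfold Spec_combined_route_station_ids combined_route_station_ids combined_route_station_ids_alt
  rw [pvDedupe_eq, pvMain]
  simp only [pvStepB_eq]
  rfl
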